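-- pv_equiv track=rewrite | github.com/theodoraiakovaki/Commentz_walter.py | commentz_walter.py | r_t
-- ===== SOURCE A (Python) =====
-- def r_t(inverted_substrings,pmin):
--     concatenated_string = ''.join(inverted_substrings)
--     unique_letters = ''.join(set(concatenated_string)) #Extract unique letters from the concatenated string
--     min_positions = {letter: float('inf') for letter in unique_letters}
--     for letter in unique_letters:  #Iterate through each letter in the unique_letters
--      for j, word in enumerate(inverted_substrings):  #Iterate through each word in the inverted_substrings
--         if letter in word:
--             index = word.index(letter) #Find the index of the first occurrence of the letter in the word
--             min_positions[letter] = min(min_positions[letter], index + 1) #Update the minimum position for the letter if necessary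
--     alphabet = [chr(i) for i in range(ord('a'), ord('z')+1)]
--     rt = {letter: pmin+1 for letter in alphabet}
--     for letter, index in min_positions.items(): #Update the "rt" dictionary with the minimum positions
--         rt[letter] = index
--     return (rt)
-- ===== SOURCE B (Python) =====
-- def r_t(inverted_substrings, pmin):
--     # One flat pass over all characters: best[ch] = 1 + smallest index of ch in any word.
--     rt = {chr(c): pmin + 1 for c in range(ord('a'), ord('z') + 1)}
--     best = {}
--     for word in inverted_substrings:
--         for j, ch in enumerate(word):
--             v = best.get(ch)
--             if v is None or j + 1 < v:
--                 best[ch] = j + 1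
--     for ch, pos in best.items():
--         rt[ch] = pos
--     return rt
-- ===== Notes on version B (the rewrite author's own statement) =====
-- stated objective: faster
-- what changed: Replaces A's set-extraction plus per-distinct-letter outer loop (an 'in' test and '.index' scan of every word per letter, then an inf-initialised min_positions merge) by a single flat pass over all characters keeping a running minimum position per character, merged into the alphabet dict.
import Mathlib
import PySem

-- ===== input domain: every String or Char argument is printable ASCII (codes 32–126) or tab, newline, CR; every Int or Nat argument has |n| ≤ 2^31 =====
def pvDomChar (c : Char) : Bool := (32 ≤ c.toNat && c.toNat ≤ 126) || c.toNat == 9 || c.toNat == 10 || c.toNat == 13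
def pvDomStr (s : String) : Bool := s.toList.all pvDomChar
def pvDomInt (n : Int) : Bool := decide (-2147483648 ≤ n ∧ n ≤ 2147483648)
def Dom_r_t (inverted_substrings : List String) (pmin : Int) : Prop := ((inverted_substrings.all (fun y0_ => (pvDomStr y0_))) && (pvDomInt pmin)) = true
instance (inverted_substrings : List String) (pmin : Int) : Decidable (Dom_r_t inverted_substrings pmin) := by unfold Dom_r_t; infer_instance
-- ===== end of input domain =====

-- B replaces A's per-distinct-letter rescans of every word (set extraction + 'in'/'.index' per
-- letter per word + inf-initialised min_positions merge) by ONE flat pass over all characters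
-- keeping a running minimum position per character (drops the distinct-letter factor; the timing
-- run measured B faster).
-- Both programs return a dict; its keys after 'a'..'z' follow, in Python, hash (set/insertion)
-- iteration order — ports use first-occurrence order; dict outputs are compared ignoring order.

-- ===== PORT A =====
-- float('inf') is modelled as `none`: min_positions values are Option Int, none = inf
-- (inf never reaches rt: every unique letter occurs in some word; see the merge step).
def pyMinInf (o : Option Int) (v : Int) : Option Int :=
  some (match o with
        | none => v          -- min(inf, v) = v
        | some x => min x v)

-- inner loop of A for one letter: `for j, word in enumerate(...): if letter in word: ...`
-- (for a one-character needle, `letter in word` is character membership and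
-- `word.index(letter)` is the first character index, PySem.List.index? — exact)
def rtAInner (ws : List String) (c : Char) (d : PySem.Dict String (Option Int)) :
    PySem.Dict String (Option Int) :=
  ws.foldl (fun d w =>
    if w.toList.contains c then
      d.insert (String.ofList [c])
        (pyMinInf (d.getD (String.ofList [c]) none) (((PySem.List.index? w.toList c).getD 0 : Int) + 1))
    else d) d

def r_t (inverted_substrings : List String) (pmin : Int) : List (String × Int) :=
  -- concatenated_string = ''.join(inverted_substrings), then iterated as characters — exact
  let cs : List Char := inverted_substrings.flatMap (·.toList)
  let unique : PySem.Set Char := PySem.Set.ofList cs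
  let minPos : PySem.Dict String (Option Int) :=
    unique.foldl (fun d c => d.insert (String.ofList [c]) none) PySem.Dict.empty
  let minPos := unique.foldl (fun d c => rtAInner inverted_substrings c d) minPos
  let alphabet : List Char := (PySem.List.pyRange 97 123 1).map (fun i => Char.ofNat i.toNat)
  let rt : PySem.Dict String Int :=
    alphabet.foldl (fun d c => d.insert (String.ofList [c]) (pmin + 1)) PySem.Dict.empty
  -- rt[letter] = index; index is never inf here (each key occurs in some word), `.getD 0` is a
  -- type coercion for the unreachable none
  let rt := minPos.items.foldl (fun d kv => d.insert kv.1 (kv.2.getD 0)) rt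
  rt.items

-- ===== PORT B =====
-- inner loop of B: `for j, ch in enumerate(word): v = best.get(ch); if v is None or j+1 < v: ...`
def rtBInner (d : PySem.Dict String Int) (p : Int × Char) : PySem.Dict String Int :=
  match d.get? (String.ofList [p.2]) with
  | none => d.insert (String.ofList [p.2]) (p.1 + 1)
  | some v => if p.1 + 1 < v then d.insert (String.ofList [p.2]) (p.1 + 1) else d

def r_t_alt (inverted_substrings : List String) (pmin : Int) : List (String × Int) :=
  let rt : PySem.Dict String Int :=
    (PySem.List.pyRange 97 123 1).foldl
      (fun d i => d.insert (String.ofList [Char.ofNat i.toNat]) (pmin + 1)) PySem.Dict.empty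
  let best : PySem.Dict String Int :=
    inverted_substrings.foldl
      (fun d w => (PySem.List.enumerate w.toList 0).foldl rtBInner d) PySem.Dict.empty
  let rt := best.items.foldl (fun d kv => d.insert kv.1 kv.2) rt
  rt.items

-- ===== PRECONDITION & SPEC =====
def Spec_r_t (inverted_substrings : List String) (pmin : Int) (out : List (String × Int)) : Prop := out = r_t_alt inverted_substrings pmin
instance (inverted_substrings : List String) (pmin : Int) (out : List (String × Int)) : Decidable (Spec_r_t inverted_substrings pmin out) := by unfold Spec_r_t; infer_instance

-- ===== CLAIM (what is proved, stated in full; the proofs are below) =====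
def Claim_equal_r_t : Prop := ∀ (inverted_substrings : List String) (pmin : Int), Dom_r_t inverted_substrings pmin → Spec_r_t inverted_substrings pmin (r_t inverted_substrings pmin)

-- ===== LEMMAS AND PROOFS =====

-- single-char String key is injective
theorem rtKey_inj : Function.Injective (fun c : Char => String.ofList [c]) := by
  intro a b h
  have h2 : [a] = [b] := by simpa using congrArg String.toList h
  simpa using h2

-- canonical per-word effect on the running minimum of letter c (none = not seen yet / inf)
def rtStep (c : Char) (o : Option Int) (w : List Char) : Option Int :=
  match PySem.List.index? w c with
  | none => o
  | some k => pyMinInf o ((k : Int) + 1)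

-- canonical total value for letter c
def rtVal (ws : List String) (c : Char) : Option Int :=
  ws.foldl (fun o w => rtStep c o w.toList) none

-- B's per-character evolution of the value of letter c, j = current index
def rtGo (c : Char) : List Char → Int → Option Int → Option Int
  | [], _, o => o
  | ch :: t, j, o =>
      rtGo c t (j + 1)
        (if ch = c then
          (match o with
           | none => some (j + 1)
           | some v => if j + 1 < v then some (j + 1) else some v)
         else o)

theorem rtGo_stable (c : Char) (t : List Char) : ∀ (j : Int) (m : Int), m ≤ j + 1 →
    rtGo c t j (some m) = some m := by
  induction t with
  | nil => intro j m h; rfl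
  | cons ch t ih =>
    intro j m h
    simp only [rtGo]
    by_cases hc : ch = c
    · subst hc; rw [if_pos rfl]
      have : ¬ (j + 1 < m) := by omega
      simp only [this, if_false]
      exact ih (j + 1) m (by omega)
    · simp only [if_neg hc]
      exact ih (j + 1) m (by omega)

theorem rtGo_spec (c : Char) (w : List Char) : ∀ (j : Int) (o : Option Int),
    rtGo c w j o = (match PySem.List.index? w c with
                    | none => o
                    | some k => pyMinInf o (j + (k : Int) + 1)) := by
  induction w with
  | nil => intro j o; simp [rtGo, PySem.List.index?]
  | cons ch t ih =>
    intro j o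
    by_cases hc : ch = c
    · subst hc
      rw [PySem.List.index?_cons_self]
      simp only [rtGo]
      have hU : (match o with
                 | none => some (j + 1)
                 | some v => if j + 1 < v then some (j + 1) else some v)
          = some ((pyMinInf o (j + 1)).getD 0) ∧ (pyMinInf o (j + 1)).getD 0 ≤ j + 1 := by
        cases o with
        | none => simp [pyMinInf]
        | some v =>
          simp only [pyMinInf, Option.getD_some]
          constructor
          · by_cases h : j + 1 < v
            · rw [if_pos h]; congr 1; omega
            · rw [if_neg h]; congr 1; omega
          · omega
      simp only [if_true]
      rw [hU.1, rtGo_stable ch t (j + 1) _ (by have := hU.2; omega)]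
      cases o with
      | none => simp [pyMinInf]
      | some v => simp only [pyMinInf, Option.getD_some]; norm_num
    · rw [PySem.List.index?_cons_of_ne _ hc]
      simp only [rtGo, if_neg hc]
      rw [ih (j + 1) o]
      rcases h : PySem.List.index? t c with _ | k
      · rfl
      · simp only [Option.map_some]
        congr 1
        push_cast
        ring

-- B's inner fold, observed at key c
theorem rtBInner_get (c : Char) (w : List Char) : ∀ (j : Int) (d : PySem.Dict String Int),
    ((PySem.List.enumerate w j).foldl rtBInner d).get? (String.ofList [c])
      = rtGo c w j (d.get? (String.ofList [c])) := by
  induction w with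
  | nil => intro j d; simp [PySem.List.enumerate_nil, rtGo]
  | cons ch t ih =>
    intro j d
    rw [PySem.List.enumerate_cons]
    simp only [List.foldl_cons]
    rw [ih (j + 1)]
    have hrhs : rtGo c (ch :: t) j (d.get? (String.ofList [c]))
        = rtGo c t (j + 1)
            (if ch = c then
              (match d.get? (String.ofList [c]) with
               | none => some (j + 1)
               | some v => if j + 1 < v then some (j + 1) else some v)
             else d.get? (String.ofList [c])) := rfl
    rw [hrhs]
    congr 1
    by_cases hc : ch = c
    · subst hc
      rw [if_pos rfl]
      rcases h : d.get? (String.ofList [ch]) with _ | v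
      · simp [rtBInner, h, PySem.Dict.get?_insert_self]
      · simp only [rtBInner, h]
        by_cases hlt : j + 1 < v
        · simp [hlt, PySem.Dict.get?_insert_self]
        · simp [hlt, h]
    · rw [if_neg hc]
      have hk : String.ofList [c] ≠ String.ofList [ch] := fun h => hc (rtKey_inj h).symm
      rcases h : d.get? (String.ofList [ch]) with _ | v
      · simp [rtBInner, h, PySem.Dict.get?_insert_of_ne _ _ hk]
      · simp only [rtBInner, h]
        by_cases hlt : j + 1 < v
        · simp [hlt, PySem.Dict.get?_insert_of_ne _ _ hk]
        · simp [hlt]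

-- B's inner fold: keys
theorem rtBInner_keys (w : List Char) : ∀ (j : Int) (d : PySem.Dict String Int),
    ((PySem.List.enumerate w j).foldl rtBInner d).keys
      = PySem.Set.update d.keys (w.map (fun c => String.ofList [c])) := by
  induction w with
  | nil => intro j d; simp [PySem.List.enumerate_nil, PySem.Set.update]
  | cons ch t ih =>
    intro j d
    rw [PySem.List.enumerate_cons]
    simp only [List.foldl_cons, List.map_cons]
    rw [ih (j + 1)]
    have hstep : (rtBInner d (j, ch)).keys = PySem.Set.add d.keys (String.ofList [ch]) := by
      rcases h : d.get? (String.ofList [ch]) with _ | v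
      · have hnc : d.contains (String.ofList [ch]) = false := by
          rw [PySem.Dict.contains_eq_isSome_get?, h]; rfl
        have hmem : String.ofList [ch] ∉ d.keys := by
          have := PySem.Dict.contains_iff_mem_keys d (String.ofList [ch])
          simp [hnc] at this; exact this
        simp [rtBInner, h, PySem.Dict.keys_insert_of_not_contains _ _ hnc,
              PySem.Set.add, hmem]
      · have hcont : d.contains (String.ofList [ch]) = true := by
          rw [PySem.Dict.contains_eq_isSome_get?, h]; rfl
        have hmem : String.ofList [ch] ∈ d.keys :=
          (PySem.Dict.contains_iff_mem_keys _ _).mp hcont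
        have hadd : PySem.Set.add d.keys (String.ofList [ch]) = d.keys := by
          simp [PySem.Set.add, hmem]
        simp only [rtBInner, h]
        by_cases hlt : j + 1 < v
        · simp [hlt, PySem.Dict.keys_insert_of_contains _ _ hcont, hadd]
        · simp [hlt, hadd]
    rw [hstep]
    rfl

-- rtGo over a whole word starting at index 0 is the per-word step rtStep
theorem rtGo_zero (c : Char) (w : List Char) (o : Option Int) :
    rtGo c w 0 o = rtStep c o w := by
  rw [rtGo_spec]
  rcases h : PySem.List.index? w c with _ | k
  · simp only [rtStep, h]
  · simp only [rtStep, h]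
    congr 1
    ring

-- A's inner loop does not touch other keys
theorem rtAInner_get?_ne (ws : List String) (c : Char) (k' : String)
    (hk : k' ≠ String.ofList [c]) : ∀ d : PySem.Dict String (Option Int),
    (rtAInner ws c d).get? k' = d.get? k' := by
  induction ws with
  | nil => intro d; rfl
  | cons w t ih =>
    intro d
    simp only [rtAInner, List.foldl_cons] at ih ⊢
    rw [ih]
    by_cases hw : w.toList.contains c
    · rw [if_pos hw, PySem.Dict.get?_insert_of_ne _ _ hk]
    · rw [if_neg hw]

-- A's inner loop at its own key computes the rtStep fold
theorem rtAInner_get?_self (ws : List String) (c : Char) :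
    ∀ (d : PySem.Dict String (Option Int)) (o0 : Option Int),
    d.get? (String.ofList [c]) = some o0 →
    (rtAInner ws c d).get? (String.ofList [c])
      = some (ws.foldl (fun o w => rtStep c o w.toList) o0) := by
  induction ws with
  | nil => intro d o0 h; simpa [rtAInner] using h
  | cons w t ih =>
    intro d o0 h
    simp only [rtAInner, List.foldl_cons] at ih ⊢
    by_cases hw : w.toList.contains c
    · rw [if_pos hw]
      have hmem : c ∈ w.toList := by simpa using hw
      obtain ⟨k, hk⟩ := Option.isSome_iff_exists.mp
        ((PySem.List.index?_isSome_iff (xs := w.toList) (v := c)).mpr hmem)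
      have hgd : d.getD (String.ofList [c]) none = o0 := by
        rw [PySem.Dict.getD_eq_get?_getD, h]; rfl
      have hstep : rtStep c o0 w.toList = pyMinInf o0 ((k : Int) + 1) := by
        simp only [rtStep, hk]
      rw [hgd, hk]
      have := ih (d.insert (String.ofList [c]) (pyMinInf o0 ((k : Int) + 1)))
        (pyMinInf o0 ((k : Int) + 1)) (PySem.Dict.get?_insert_self _ _ _)
      simpa [hstep] using this
    · rw [if_neg hw]
      have hnm : c ∉ w.toList := by simpa using hw
      have hidx : PySem.List.index? w.toList c = none :=
        (PySem.List.index?_eq_none_iff _ _).mpr hnm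
      have hstep : rtStep c o0 w.toList = o0 := by simp only [rtStep, hidx]
      rw [ih d o0 h, hstep]

-- A's outer loop over letters ∉ l does not touch key c
theorem rtAOuter_ne (ws : List String) (c : Char) : ∀ (l : List Char), c ∉ l →
    ∀ d : PySem.Dict String (Option Int),
    (l.foldl (fun d c' => rtAInner ws c' d) d).get? (String.ofList [c])
      = d.get? (String.ofList [c]) := by
  intro l
  induction l with
  | nil => intro _ d; rfl
  | cons a t ih =>
    intro hc d
    simp only [List.foldl_cons]
    have hca : c ≠ a := fun h => hc (h ▸ List.mem_cons_self)
    rw [ih (fun h => hc (List.mem_cons_of_mem _ h))]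
    exact rtAInner_get?_ne ws a _ (fun h => hca (rtKey_inj h)) d

-- A's outer loop: value at key c, for c occurring once in l with initial value inf
theorem rtAOuter_get? (ws : List String) : ∀ (l : List Char), l.Nodup →
    ∀ c ∈ l, ∀ d : PySem.Dict String (Option Int),
    d.get? (String.ofList [c]) = some none →
    (l.foldl (fun d c' => rtAInner ws c' d) d).get? (String.ofList [c])
      = some (rtVal ws c) := by
  intro l
  induction l with
  | nil => intro _ c hc; exact absurd hc (List.not_mem_nil)
  | cons a t ih =>
    intro hnd c hc d h
    have hat : a ∉ t := (List.nodup_cons.mp hnd).1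
    simp only [List.foldl_cons]
    rcases List.mem_cons.mp hc with hca | hct
    · subst hca
      rw [rtAOuter_ne ws c t hat]
      exact rtAInner_get?_self ws c d none h
    · have hca : c ≠ a := fun h' => hat (h' ▸ hct)
      refine ih (List.nodup_cons.mp hnd).2 c hct _ ?_
      rw [rtAInner_get?_ne ws a _ (fun h' => hca (rtKey_inj h')) d]
      exact h

-- A's inner loop keeps the key set (its key is already present)
theorem rtAInner_keys (ws : List String) (c : Char) :
    ∀ d : PySem.Dict String (Option Int), d.contains (String.ofList [c]) = true →
    (rtAInner ws c d).keys = d.keys := by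
  induction ws with
  | nil => intro d _; rfl
  | cons w t ih =>
    intro d hcont
    simp only [rtAInner, List.foldl_cons] at ih ⊢
    by_cases hw : w.toList.contains c
    · rw [if_pos hw, ih _ (PySem.Dict.contains_insert_self _ _ _),
          PySem.Dict.keys_insert_of_contains _ _ hcont]
    · rw [if_neg hw, ih d hcont]

-- A's outer loop keeps the key set
theorem rtAOuter_keys (ws : List String) : ∀ (l : List Char),
    ∀ d : PySem.Dict String (Option Int),
    (∀ c ∈ l, d.contains (String.ofList [c]) = true) →
    (l.foldl (fun d c' => rtAInner ws c' d) d).keys = d.keys := by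
  intro l
  induction l with
  | nil => intro d _; rfl
  | cons a t ih =>
    intro d h
    simp only [List.foldl_cons]
    have hka : (rtAInner ws a d).keys = d.keys :=
      rtAInner_keys ws a d (h a List.mem_cons_self)
    rw [ih (rtAInner ws a d) ?_, hka]
    intro c hc
    rw [PySem.Dict.contains_eq_decide_mem_keys, hka,
        ← PySem.Dict.contains_eq_decide_mem_keys]
    exact h c (List.mem_cons_of_mem _ hc)

-- Set.add through the injective single-char-string map
theorem rtSet_add_map (t : List Char) (x : Char) :
    PySem.Set.add (t.map (fun c => String.ofList [c])) (String.ofList [x])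
      = (PySem.Set.add t x).map (fun c => String.ofList [c]) := by
  by_cases hx : x ∈ t
  · have hx' : String.ofList [x] ∈ t.map (fun c => String.ofList [c]) :=
      List.mem_map_of_mem hx
    simp [PySem.Set.add, hx, hx']
  · have hx' : String.ofList [x] ∉ t.map (fun c => String.ofList [c]) := by
      intro hm
      obtain ⟨y, hy, he⟩ := List.mem_map.mp hm
      exact hx (rtKey_inj he ▸ hy)
    simp [PySem.Set.add, hx, hx']

-- Set.update through the injective single-char-string map
theorem rtSet_update_map : ∀ (xs : List Char) (t : List Char),
    PySem.Set.update (t.map (fun c => String.ofList [c])) (xs.map (fun c => String.ofList [c]))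
      = (PySem.Set.update t xs).map (fun c => String.ofList [c]) := by
  intro xs
  induction xs with
  | nil => intro t; rfl
  | cons x r ih =>
    intro t
    simp only [List.map_cons, PySem.Set.update, List.foldl_cons] at ih ⊢
    rw [rtSet_add_map, ih]

-- B's whole best-building loop: key set
theorem rtBOuter_keys (ws : List String) : ∀ d : PySem.Dict String Int,
    (ws.foldl (fun d w => (PySem.List.enumerate w.toList 0).foldl rtBInner d) d).keys
      = PySem.Set.update d.keys
          ((ws.flatMap (·.toList)).map (fun c => String.ofList [c])) := by
  induction ws with
  | nil => intro d; rfl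
  | cons w t ih =>
    intro d
    simp only [List.foldl_cons, List.flatMap_cons, List.map_append]
    rw [ih, rtBInner_keys w.toList 0 d]
    simp [PySem.Set.update, List.foldl_append]

-- B's whole best-building loop: value at key c
theorem rtBOuter_get? (c : Char) (ws : List String) : ∀ d : PySem.Dict String Int,
    (ws.foldl (fun d w => (PySem.List.enumerate w.toList 0).foldl rtBInner d) d).get?
        (String.ofList [c])
      = ws.foldl (fun o w => rtStep c o w.toList) (d.get? (String.ofList [c])) := by
  induction ws with
  | nil => intro d; rfl
  | cons w t ih =>
    intro d
    simp only [List.foldl_cons]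
    rw [ih, rtBInner_get c w.toList 0 d, rtGo_zero]

-- ===== VERDICT (by name: the statement is the Claim_ definition above) =====
set_option maxHeartbeats 1000000 in
theorem r_t_spec : Claim_equal_r_t := by
  intro ws pmin _
  show (List.foldl (fun d kv => d.insert kv.1 (kv.2.getD 0))
        (List.foldl (fun d c => d.insert (String.ofList [c]) (pmin + 1)) PySem.Dict.empty
          (List.map (fun i => Char.ofNat i.toNat) (PySem.List.pyRange 97 123 1)))
        (List.foldl (fun d c => rtAInner ws c d)
          (List.foldl (fun d c => d.insert (String.ofList [c]) none) PySem.Dict.empty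
            (PySem.Set.ofList (ws.flatMap (·.toList))))
          (PySem.Set.ofList (ws.flatMap (·.toList)))).items).items
    = (List.foldl (fun d kv => d.insert kv.1 kv.2)
        (List.foldl (fun d i => d.insert (String.ofList [Char.ofNat i.toNat]) (pmin + 1))
          PySem.Dict.empty (PySem.List.pyRange 97 123 1))
        (List.foldl (fun d w => List.foldl rtBInner d (PySem.List.enumerate w.toList 0))
          PySem.Dict.empty ws).items).items
  set key : Char → String := fun c => String.ofList [c] with hkeydef
  set cs : List Char := ws.flatMap (·.toList) with hcs
  set u : List Char := PySem.Set.ofList cs with hu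
  have hund : u.Nodup := PySem.Set.nodup_ofList cs
  have hukey : (u.map key).Nodup := hund.map rtKey_inj
  -- initial min_positions dict
  set m0 : PySem.Dict String (Option Int) :=
    u.foldl (fun d c => d.insert (String.ofList [c]) none) PySem.Dict.empty with hm0
  have hitems0 : m0.items = u.map (fun c => (key c, (none : Option Int))) := by
    rw [hm0]
    have := PySem.Dict.items_foldl_insert_fresh (l := u) (d := PySem.Dict.empty)
      (k := fun c => String.ofList [c]) (v := fun _ => (none : Option Int))
      (fun a _ => PySem.Dict.contains_empty _) hukey
    simpa using this
  have hkeys0 : m0.keys = u.map key := by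
    simp only [PySem.Dict.keys, hitems0, List.map_map]
    rfl
  have hnd0 : m0.keys.Nodup := by rw [hkeys0]; exact hukey
  have hget0 : ∀ c ∈ u, m0.get? (key c) = some none := by
    intro c hc
    exact PySem.Dict.get?_of_mem_items _ (by rw [hitems0]; exact List.mem_map_of_mem hc) hnd0
  have hcont0 : ∀ c ∈ u, m0.contains (key c) = true := by
    intro c hc
    rw [PySem.Dict.contains_eq_isSome_get?, hget0 c hc]
    rfl
  -- final min_positions dict
  set m1 : PySem.Dict String (Option Int) :=
    u.foldl (fun d c => rtAInner ws c d) m0 with hm1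
  have hkeys1 : m1.keys = u.map key := by rw [hm1, rtAOuter_keys ws u m0 hcont0, hkeys0]
  have hnd1 : m1.keys.Nodup := by rw [hkeys1]; exact hukey
  have hget1 : ∀ c ∈ u, m1.get? (key c) = some (rtVal ws c) := by
    intro c hc
    exact rtAOuter_get? ws u hund c hc m0 (hget0 c hc)
  have hitemsA : m1.items = u.map (fun c => (key c, rtVal ws c)) := by
    rw [PySem.Dict.items_eq_map_keys m1 hnd1 none, hkeys1, List.map_map]
    refine List.map_congr_left ?_
    intro c hc
    simp only [Function.comp]
    rw [PySem.Dict.getD_eq_get?_getD, hget1 c hc]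
    rfl
  -- B's best dict
  set best : PySem.Dict String Int :=
    ws.foldl (fun d w => (PySem.List.enumerate w.toList 0).foldl rtBInner d)
      PySem.Dict.empty with hbest
  have hkeysB : best.keys = u.map key := by
    rw [hbest, rtBOuter_keys ws PySem.Dict.empty]
    have h1 : (PySem.Dict.empty : PySem.Dict String Int).keys = ([] : List Char).map key := by rfl
    rw [h1, rtSet_update_map cs []]
    rfl
  have hndB : best.keys.Nodup := by rw [hkeysB]; exact hukey
  have hgetB : ∀ c : Char, best.get? (key c) = rtVal ws c := by
    intro c
    rw [hbest, rtBOuter_get? c ws PySem.Dict.empty, PySem.Dict.get?_empty]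
    rfl
  have hitemsB : best.items = u.map (fun c => (key c, (rtVal ws c).getD 0)) := by
    rw [PySem.Dict.items_eq_map_keys best hndB 0, hkeysB, List.map_map]
    refine List.map_congr_left ?_
    intro c hc
    simp only [Function.comp]
    rw [PySem.Dict.getD_eq_get?_getD, hgetB c]
  -- the two alphabet dicts coincide
  have hrt0 : ((PySem.List.pyRange 97 123 1).map (fun i => Char.ofNat i.toNat)).foldl
        (fun d c => d.insert (String.ofList [c]) (pmin + 1)) PySem.Dict.empty
      = (PySem.List.pyRange 97 123 1).foldl
        (fun d i => d.insert (String.ofList [Char.ofNat i.toNat]) (pmin + 1))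
        PySem.Dict.empty := by
    rw [List.foldl_map]
  -- the two merge loops coincide
  refine congrArg PySem.Dict.items ?_
  rw [hitemsA, hitemsB, hrt0, List.foldl_map, List.foldl_map]
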